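-- pv_equiv track=rewrite | github.com/thing-zoo/algorithm-study | BOJ/thing-zoo/17.트리/트리인가?.py | check
-- ===== SOURCE A (Python) =====
-- def dfs(u, outs, visited):
--     visited[u] = True
--     for v in outs[u]:
--         if not visited[v]:
--             visited[v] = True
--             dfs(v, outs, visited)
--
-- def check(nodes, ins, outs):
--     root = 0
--     count = 0
--     visited = {}
--     if len(nodes) == 0: # 빈 트리
--         return True
--     for i in nodes:
--         visited[i] = False
--         if i not in ins: # 들어오는 간선이 없는 루트
--             count += 1
--             root = i
--         elif len(ins[i]) != 1: # 루트 외는 반드시 들어오는 간선 하나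
--             return False
--     if count != 1: # 루트가 하나인지 확인
--         return False
--
--     # 루트에서 다른노드로 가는 경로 확인
--     dfs(root, outs, visited)
--     if False in visited.values():
--         return False
--
--     return True
-- ===== SOURCE B (Python) =====
-- def check(nodes, ins, outs):
--     if not nodes:
--         return True
--     if any(i in ins and len(ins[i]) != 1 for i in nodes):
--         return False
--     roots = [i for i in nodes if i not in ins]
--     if len(roots) != 1:
--         return False
--     root = roots[0]
--     seen = {root}
--     stack = [root]
--     while stack:
--         u = stack.pop()
--         for v in outs[u]:
--             if v not in seen:
--                 seen.add(v)
--                 stack.append(v)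
--     return all(i in seen for i in nodes)
-- ===== Notes on version B (the rewrite author's own statement) =====
-- stated objective: alternative
-- what changed: The single counting/early-return validation loop is split into declarative any/filter passes, and the recursive dfs mutating a visited dict is replaced by an iterative traversal with an explicit stack and a seen set, checked with all(i in seen for i in nodes).
-- outside the precondition, e.g. on check([1, 2], {2: [9]}, {1: []}): A returns False, B returns False
import Mathlib
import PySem

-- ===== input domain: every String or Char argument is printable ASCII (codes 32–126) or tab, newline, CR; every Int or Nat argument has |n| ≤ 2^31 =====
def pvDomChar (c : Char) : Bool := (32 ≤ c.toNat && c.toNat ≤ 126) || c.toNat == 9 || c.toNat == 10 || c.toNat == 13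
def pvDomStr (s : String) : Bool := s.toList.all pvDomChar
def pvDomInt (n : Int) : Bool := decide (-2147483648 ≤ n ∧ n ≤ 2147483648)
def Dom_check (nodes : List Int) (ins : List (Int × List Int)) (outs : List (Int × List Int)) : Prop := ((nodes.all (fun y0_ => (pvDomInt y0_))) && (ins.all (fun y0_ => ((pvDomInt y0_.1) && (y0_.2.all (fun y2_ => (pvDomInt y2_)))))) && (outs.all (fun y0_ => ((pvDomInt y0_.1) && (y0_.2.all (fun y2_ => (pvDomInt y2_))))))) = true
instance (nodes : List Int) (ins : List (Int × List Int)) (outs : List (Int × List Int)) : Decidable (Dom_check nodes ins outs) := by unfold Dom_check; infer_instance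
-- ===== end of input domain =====

-- B replaces A's recursive dfs over a mutated visited dict by an iterative stack traversal with a
-- seen set, and A's counting validation loop by declarative any/filter passes (objective: alternative).
-- The dicts ins/outs are association lists (first-match lookup).

-- 'i in d' for an association list
def pyHasKey (l : List (Int × List Int)) (k : Int) : Bool := l.any (fun p => p.1 == k)
-- 'd[i]' (first match; None = KeyError)
def pyLookup (l : List (Int × List Int)) (k : Int) : Option (List Int) := l.lookup k

-- ===== PORT A =====
-- the recursive dfs; fuel only makes the recursion structural (nodes.length + 1 is proved enough
-- under Pre_check); none = KeyError (or fuel exhaustion, unreachable under Pre_check)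
mutual
def dfsF (outs : List (Int × List Int)) : Nat → Int → PySem.Dict Int Bool → Option (PySem.Dict Int Bool)
  | 0, _, _ => none
  | Nat.succ f, u, visited =>
      match pyLookup outs u with
      | none => none
      | some nbrs => dfsList outs f nbrs (visited.insert u true)
termination_by f _ _ => (f, 0)
def dfsList (outs : List (Int × List Int)) : Nat → List Int → PySem.Dict Int Bool → Option (PySem.Dict Int Bool)
  | _, [], visited => some visited
  | f, v :: rest, visited =>
      match visited.get? v with
      | none => none
      | some b =>
        if b then dfsList outs f rest visited
        else
          match dfsF outs f v (visited.insert v true) with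
          | none => none
          | some visited' => dfsList outs f rest visited'
termination_by f l _ => (f, l.length + 1)
end

-- the 'for i in nodes' validation loop; none = the loop's 'return False'
def aLoop (ins : List (Int × List Int)) : List Int → Int → Int → PySem.Dict Int Bool → Option (Int × Int × PySem.Dict Int Bool)
  | [], root, count, visited => some (root, count, visited)
  | i :: rest, root, count, visited =>
      let visited' := visited.insert i false
      if pyHasKey ins i then
        if ((pyLookup ins i).getD []).length ≠ 1 then none
        else aLoop ins rest root count visited'
      else aLoop ins rest i (count + 1) visited'

def check (nodes : List Int) (ins : List (Int × List Int)) (outs : List (Int × List Int)) : Bool :=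
  if nodes.length = 0 then true
  else
    match aLoop ins nodes 0 0 PySem.Dict.empty with
    | none => false
    | some (root, count, visited) =>
      if count ≠ 1 then false
      else
        match dfsF outs (nodes.length + 1) root visited with
        | none => false    -- KeyError in dfs: excluded by Pre_check
        | some visited' => !(visited'.values.contains false)

-- ===== PORT B =====
-- the while loop over the explicit stack; the Lean stack list is kept top-first, so Python's
-- stack.pop() (last element) is our head and stack.append pushes on the head; none = KeyError
-- (or fuel exhaustion, unreachable under Pre_check)
def bLoop (outs : List (Int × List Int)) : Nat → PySem.Set Int → List Int → Option (PySem.Set Int)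
  | _, seen, [] => some seen
  | 0, _, _ :: _ => none
  | Nat.succ f, seen, u :: stack =>
      match pyLookup outs u with
      | none => none
      | some nbrs =>
        let p := nbrs.foldl
          (fun (p : PySem.Set Int × List Int) v =>
            if PySem.Set.contains p.1 v then p else (PySem.Set.add p.1 v, v :: p.2))
          (seen, stack)
        bLoop outs f p.1 p.2

def check_alt (nodes : List Int) (ins : List (Int × List Int)) (outs : List (Int × List Int)) : Bool :=
  if nodes.isEmpty then true
  else if nodes.any (fun i => pyHasKey ins i && ((pyLookup ins i).getD []).length != 1) then false
  else
    match nodes.filter (fun i => !pyHasKey ins i) with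
    | [root] =>
        match bLoop outs (nodes.length + 1) (PySem.Set.ofList [root]) [root] with
        | none => false    -- KeyError in the traversal: excluded by Pre_check
        | some seen => nodes.all (fun i => PySem.Set.contains seen i)
    | _ => false           -- len(roots) != 1

-- ===== PRECONDITION & SPEC =====
-- Pre_check excludes exactly the ill-formed traversal inputs: validation passes but some node has
-- no outs entry or an outs edge leaving nodes; there A's dfs (and B's loop) raises KeyError
-- whenever the traversal reaches the gap, and whether it is reached is a reachability question
-- with no closed form, so the whole ill-formed class is excluded (on its unreached part A still
-- returns False, and so does B — see the cite in claim.json).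
def Pre_check (nodes : List Int) (ins : List (Int × List Int)) (outs : List (Int × List Int)) : Prop :=
  nodes = []
  ∨ (∃ i ∈ nodes, pyHasKey ins i = true ∧ ((pyLookup ins i).getD []).length ≠ 1)
  ∨ nodes.countP (fun i => !pyHasKey ins i) ≠ 1
  ∨ (∀ i ∈ nodes, (pyLookup outs i).isSome ∧ ∀ v ∈ (pyLookup outs i).getD [], v ∈ nodes)
instance (nodes : List Int) (ins : List (Int × List Int)) (outs : List (Int × List Int)) : Decidable (Pre_check nodes ins outs) := by unfold Pre_check; infer_instance

def pvWitness_check : List Int × (List (Int × List Int)) × (List (Int × List Int)) :=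
  ([1, 2, 3], [(2, [1]), (3, [1])], [(1, [2, 3]), (2, []), (3, [])])

def Spec_check (nodes : List Int) (ins : List (Int × List Int)) (outs : List (Int × List Int)) (out : Bool) : Prop := out = check_alt nodes ins outs
instance (nodes : List Int) (ins : List (Int × List Int)) (outs : List (Int × List Int)) (out : Bool) : Decidable (Spec_check nodes ins outs out) := by unfold Spec_check; infer_instance

-- ===== CLAIM (what is proved, stated in full; the proofs are below) =====
def Claim_equal_check : Prop := ∀ (nodes : List Int) (ins : List (Int × List Int)) (outs : List (Int × List Int)), Dom_check nodes ins outs → Pre_check nodes ins outs → Spec_check nodes ins outs (check nodes ins outs)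

-- ===== LEMMAS AND PROOFS =====

-- ---- small bridges ----

theorem getD_getLast?_cons (a r : Int) (t : List Int) :
    ((a :: t).getLast?).getD r = (t.getLast?).getD a := by
  cases h : t.getLast? <;> simp [List.getLast?_cons, h]

-- ---- the validation loop of A, characterised ----

theorem aLoop_eq (ins : List (Int × List Int)) (l : List Int) (root count : Int)
    (vis : PySem.Dict Int Bool) :
    aLoop ins l root count vis =
      if l.all (fun i => !pyHasKey ins i || ((pyLookup ins i).getD []).length == 1)
      then some (((l.filter (fun i => !pyHasKey ins i)).getLast?).getD root,
                 count + (l.countP (fun i => !pyHasKey ins i) : Int),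
                 l.foldl (fun d i => d.insert i false) vis)
      else none := by
  induction l generalizing root count vis with
  | nil => simp [aLoop]
  | cons i rest ih =>
    by_cases hk : pyHasKey ins i = true
    · by_cases hl : ((pyLookup ins i).getD []).length = 1
      · simp [aLoop, hk, hl, ih]
      · simp [aLoop, hk, hl]
    · simp only [Bool.not_eq_true] at hk
      rw [show aLoop ins (i :: rest) root count vis
            = aLoop ins rest i (count + 1) (vis.insert i false) from by simp [aLoop, hk]]
      rw [ih]
      simp only [List.all_cons, hk, Bool.not_false, Bool.true_or, Bool.true_and,
        List.filter_cons, List.countP_cons, List.foldl_cons]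
      by_cases hall : (rest.all fun i => !pyHasKey ins i || ((pyLookup ins i).getD []).length == 1) = true
      · simp only [hall, if_true, getD_getLast?_cons, Option.some.injEq, Prod.mk.injEq]
        and_intros <;> first
        | trivial
        | (push_cast; ring)
      · simp [hall]

-- ---- the initial visited dict ----

theorem get?_foldl_insert_false (l : List Int) (d : PySem.Dict Int Bool) (k : Int) :
    (l.foldl (fun d i => d.insert i false) d).get? k = if k ∈ l then some false else d.get? k := by
  induction l generalizing d with
  | nil => simp
  | cons i rest ih =>
    simp only [List.foldl_cons, ih, List.mem_cons]
    by_cases hm : k ∈ rest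
    · simp [hm]
    · by_cases he : k = i <;> simp [hm, he, PySem.Dict.get?_insert]

-- ---- counting the False entries (the dfs termination measure) ----

def falseCount (d : PySem.Dict Int Bool) : Nat := d.items.countP (fun p => p.2 == false)

theorem falseCount_eq_keys (d : PySem.Dict Int Bool) (h : d.keys.Nodup) :
    falseCount d = d.keys.countP (fun k => d.getD k false == false) := by
  unfold falseCount
  conv_lhs => rw [PySem.Dict.items_eq_map_keys d h false]
  rw [List.countP_map]
  rfl

theorem get?_isSome_of_mem_keys (d : PySem.Dict Int Bool) (k : Int) (h : k ∈ d.keys) :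
    ∃ b, d.get? k = some b := by
  have hc : d.contains k = true := (PySem.Dict.contains_iff_mem_keys d k).mpr h
  rw [PySem.Dict.contains_eq_isSome_get?] at hc
  cases hg : d.get? k
  · rw [hg] at hc; simp at hc
  · exact ⟨_, rfl⟩

theorem falseCount_le_of_mono (d d' : PySem.Dict Int Bool) (hk : d'.keys = d.keys)
    (hn : d.keys.Nodup) (hm : ∀ k, d.get? k = some true → d'.get? k = some true) :
    falseCount d' ≤ falseCount d := by
  rw [falseCount_eq_keys d hn, falseCount_eq_keys d' (by rw [hk]; exact hn), hk]
  apply List.countP_mono_left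
  intro k hkmem hp
  obtain ⟨b, hb⟩ := get?_isSome_of_mem_keys d k hkmem
  cases b
  · simp [PySem.Dict.getD_of_get?_eq_some d false hb]
  · have := hm k hb
    simp [PySem.Dict.getD_of_get?_eq_some d' false this] at hp

theorem countP_update_of_nodup (l : List Int) (hl : l.Nodup) (v : Int) (hv : v ∈ l)
    (p q : Int → Bool) (hq : q v = false) (hp : p v = true)
    (hagree : ∀ k ∈ l, k ≠ v → q k = p k) :
    l.countP q + 1 = l.countP p := by
  induction l with
  | nil => cases hv
  | cons a t ih =>
    simp only [List.countP_cons]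
    rcases List.mem_cons.mp hv with rfl | hvt
    · have hnv : v ∉ t := (List.nodup_cons.mp hl).1
      have ht : t.countP q = t.countP p := by
        apply List.countP_congr
        intro k hk
        have := hagree k (List.mem_cons_of_mem _ hk) (fun he => hnv (he ▸ hk))
        simp [this]
      simp [hq, hp, ht]
    · have hav : a ≠ v := fun he => ((List.nodup_cons.mp hl).1 (he ▸ hvt))
      have ha : q a = p a := hagree a List.mem_cons_self hav
      have := ih (List.nodup_cons.mp hl).2 hvt (fun k hk hne => hagree k (List.mem_cons_of_mem _ hk) hne)
      rw [ha]
      omega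

theorem falseCount_insert_true (d : PySem.Dict Int Bool) (v : Int) (hn : d.keys.Nodup)
    (h : d.get? v = some false) :
    falseCount (d.insert v true) + 1 = falseCount d := by
  have hc : d.contains v = true := by rw [PySem.Dict.contains_eq_isSome_get?, h]; rfl
  have hkeys : (d.insert v true).keys = d.keys := PySem.Dict.keys_insert_of_contains d true hc
  have hv : v ∈ d.keys := (PySem.Dict.contains_iff_mem_keys d v).mp hc
  rw [falseCount_eq_keys _ hn, falseCount_eq_keys _ (by rw [hkeys]; exact hn), hkeys]
  apply countP_update_of_nodup d.keys hn v hv _ _ ?_ ?_ ?_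
  · simp [PySem.Dict.getD_insert_self]
  · simp [PySem.Dict.getD_of_get?_eq_some d false h]
  · intro k hk hne
    rw [PySem.Dict.getD_insert_of_ne d true false hne]

-- ---- specification of A's dfs ----

def DfsPost (outs : List (Int × List Int)) (KS : List Int) (Base : Int → Prop)
    (vis vis' : PySem.Dict Int Bool) : Prop :=
  vis'.keys = KS
  ∧ (∀ k, vis.get? k = some true → vis'.get? k = some true)
  ∧ (∀ k, vis'.get? k = some true →
      vis.get? k = some true ∨ ∀ w ∈ (pyLookup outs k).getD [], vis'.get? w = some true)
  ∧ (∀ P : Int → Prop, (∀ a b, P a → b ∈ (pyLookup outs a).getD [] → P b) → (∀ x, Base x → P x) →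
      ∀ k, vis'.get? k = some true → vis.get? k = some true ∨ P k)

def PF (outs : List (Int × List Int)) (KS : List Int) (f : Nat) : Prop :=
  ∀ u vis, vis.keys = KS → u ∈ KS → falseCount vis < f →
    ∃ vis', dfsF outs f u vis = some vis' ∧ DfsPost outs KS (· = u) vis vis'
      ∧ vis'.get? u = some true ∧ (∀ w ∈ (pyLookup outs u).getD [], vis'.get? w = some true)

def QL (outs : List (Int × List Int)) (KS : List Int) (f : Nat) : Prop :=
  ∀ l vis, vis.keys = KS → (∀ v ∈ l, v ∈ KS) → falseCount vis ≤ f →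
    ∃ vis', dfsList outs f l vis = some vis' ∧ DfsPost outs KS (· ∈ l) vis vis'
      ∧ (∀ v ∈ l, vis'.get? v = some true)

theorem ql_of_pf (outs : List (Int × List Int)) (KS : List Int) (hnod : KS.Nodup)
    (f : Nat) (hPF : PF outs KS f) : QL outs KS f := by
  intro l
  induction l with
  | nil =>
    intro vis hkeys _ _
    exact ⟨vis, by rw [dfsList], ⟨hkeys, fun _ h => h, fun k h => Or.inl h, fun _ _ _ k h => Or.inl h⟩,
      fun v hv => absurd hv (List.not_mem_nil)⟩
  | cons v rest ih =>
    intro vis hkeys hsub hfc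
    have hvK : v ∈ KS := hsub v List.mem_cons_self
    obtain ⟨b, hb⟩ := get?_isSome_of_mem_keys vis v (hkeys ▸ hvK)
    cases b with
    | true =>
      obtain ⟨vis', hrun, post, htrues⟩ :=
        ih vis hkeys (fun x hx => hsub x (List.mem_cons_of_mem _ hx)) hfc
      refine ⟨vis', by rw [dfsList, hb]; simp [hrun], ?_, ?_⟩
      · obtain ⟨p1, p2, p3, p4⟩ := post
        refine ⟨p1, p2, p3, fun P hcl hbase k hk => p4 P hcl (fun x hx => hbase x (List.mem_cons_of_mem _ hx)) k hk⟩
      · intro w hw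
        rcases List.mem_cons.mp hw with rfl | hw
        · exact post.2.1 w hb
        · exact htrues w hw
    | false =>
      have hnodvis : vis.keys.Nodup := by rw [hkeys]; exact hnod
      have hfc1 : falseCount (vis.insert v true) + 1 = falseCount vis :=
        falseCount_insert_true vis v hnodvis hb
      have hcont : vis.contains v = true := by rw [PySem.Dict.contains_eq_isSome_get?, hb]; rfl
      have hkeys2 : (vis.insert v true).keys = KS := by
        rw [PySem.Dict.keys_insert_of_contains vis true hcont]; exact hkeys
      obtain ⟨vis3, hrun3, post3, hvtrue3, hadjv3⟩ :=
        hPF v (vis.insert v true) hkeys2 hvK (by omega)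
      have hmono13 : ∀ k, vis.get? k = some true → vis3.get? k = some true := by
        intro k hk
        refine post3.2.1 k ?_
        rcases eq_or_ne k v with rfl | hne
        · exact PySem.Dict.get?_insert_self vis k true
        · rw [PySem.Dict.get?_insert] at *
          simp [hne, hk]
      have hfc3 : falseCount vis3 ≤ f := by
        have hle : falseCount vis3 ≤ falseCount (vis.insert v true) := by
          apply falseCount_le_of_mono _ _ (by rw [post3.1, hkeys2]) (by rw [hkeys2]; exact hnod)
          exact post3.2.1
        omega
      obtain ⟨vis', hrun', post', hresttrue⟩ :=
        ih vis3 post3.1 (fun x hx => hsub x (List.mem_cons_of_mem _ hx)) hfc3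
      have hmono3' : ∀ k, vis3.get? k = some true → vis'.get? k = some true := post'.2.1
      refine ⟨vis', by rw [dfsList, hb]; simp [hrun3, hrun'], ?_, ?_⟩
      · refine ⟨post'.1, fun k hk => hmono3' k (hmono13 k hk), ?_, ?_⟩
        · -- newClosed
          intro k hk
          rcases post'.2.2.1 k hk with h3 | hcl
          · rcases post3.2.2.1 k h3 with h2 | hcl
            · rcases eq_or_ne k v with rfl | hne
              · exact Or.inr fun w hw => hmono3' w (hadjv3 w hw)
              · rw [PySem.Dict.get?_insert] at h2
                simp only [hne, if_false] at h2
                exact Or.inl (by simpa using h2)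
            · exact Or.inr fun w hw => hmono3' w (hcl w hw)
          · exact Or.inr hcl
        · -- minimality
          intro P hclosed hbase k hk
          have hPv : P v := hbase v List.mem_cons_self
          rcases post'.2.2.2 P hclosed (fun x hx => hbase x (List.mem_cons_of_mem _ hx)) k hk with h3 | hP
          · rcases post3.2.2.2 P hclosed (fun x hx => hx ▸ hPv) k h3 with h2 | hP
            · rcases eq_or_ne k v with rfl | hne
              · exact Or.inr hPv
              · rw [PySem.Dict.get?_insert] at h2
                simp only [hne, if_false] at h2
                exact Or.inl (by simpa using h2)
            · exact Or.inr hP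
          · exact Or.inr hP
      · intro w hw
        rcases List.mem_cons.mp hw with rfl | hw
        · exact hmono3' w hvtrue3
        · exact hresttrue w hw

theorem pf_all (outs : List (Int × List Int)) (KS : List Int) (hnod : KS.Nodup)
    (WF : ∀ k ∈ KS, (pyLookup outs k).isSome ∧ ∀ v ∈ (pyLookup outs k).getD [], v ∈ KS) :
    ∀ f, PF outs KS f := by
  intro f
  induction f with
  | zero => intro u vis _ _ hfc; exact absurd hfc (Nat.not_lt_zero _)
  | succ f ih =>
    have hQ := ql_of_pf outs KS hnod f ih
    intro u vis hkeys huK hfc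
    obtain ⟨nbrs, hnbrs⟩ : ∃ nbrs, pyLookup outs u = some nbrs := by
      rcases h : pyLookup outs u with _ | nbrs
      · exfalso; have h2 := (WF u huK).1; rw [h] at h2; simp at h2
      · exact ⟨nbrs, rfl⟩
    have hadjsub : ∀ v ∈ nbrs, v ∈ KS := by
      have h2 := (WF u huK).2; rw [hnbrs] at h2; exact h2
    have hcont : vis.contains u = true := by
      rw [PySem.Dict.contains_iff_mem_keys, hkeys]; exact huK
    have hkeys2 : (vis.insert u true).keys = KS := by
      rw [PySem.Dict.keys_insert_of_contains vis true hcont]; exact hkeys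
    have hmono12 : ∀ k, vis.get? k = some true → (vis.insert u true).get? k = some true := by
      intro k hk
      rcases eq_or_ne k u with rfl | hne
      · exact PySem.Dict.get?_insert_self vis k true
      · rw [PySem.Dict.get?_insert]; simp [hne, hk]
    have hfc2 : falseCount (vis.insert u true) ≤ f := by
      have hle : falseCount (vis.insert u true) ≤ falseCount vis := by
        apply falseCount_le_of_mono _ _ (by rw [hkeys2, hkeys]) (by rw [hkeys]; exact hnod)
        exact hmono12
      omega
    obtain ⟨vis', hrun, post, htrues⟩ := hQ nbrs (vis.insert u true) hkeys2 hadjsub hfc2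
    have hmono2' : ∀ k, (vis.insert u true).get? k = some true → vis'.get? k = some true := post.2.1
    have hadjtrue : ∀ w ∈ (pyLookup outs u).getD [], vis'.get? w = some true := by
      rw [hnbrs]; exact htrues
    refine ⟨vis', by rw [dfsF, hnbrs]; simp [hrun], ?_, ?_, hadjtrue⟩
    · refine ⟨post.1, fun k hk => hmono2' k (hmono12 k hk), ?_, ?_⟩
      · -- newClosed
        intro k hk
        rcases post.2.2.1 k hk with h2 | hcl
        · rcases eq_or_ne k u with rfl | hne
          · exact Or.inr hadjtrue
          · rw [PySem.Dict.get?_insert] at h2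
            simp only [hne, if_false] at h2
            exact Or.inl (by simpa using h2)
        · exact Or.inr hcl
      · -- minimality
        intro P hclosed hbase k hk
        have hPu : P u := hbase u rfl
        have hbase' : ∀ x, x ∈ nbrs → P x := by
          intro x hx
          refine hclosed u x hPu ?_
          rw [hnbrs]; exact hx
        rcases post.2.2.2 P hclosed hbase' k hk with h2 | hP
        · rcases eq_or_ne k u with rfl | hne
          · exact Or.inr hPu
          · rw [PySem.Dict.get?_insert] at h2
            simp only [hne, if_false] at h2
            exact Or.inl (by simpa using h2)
        · exact Or.inr hP
    · exact hmono2' u (PySem.Dict.get?_insert_self vis u true)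

-- ---- specification of B's neighbour fold and stack loop ----

theorem bFold_spec (nbrs : List Int) (seen : PySem.Set Int) (stack : List Int) :
    (nbrs.foldl (fun (p : PySem.Set Int × List Int) v =>
        if PySem.Set.contains p.1 v then p else (PySem.Set.add p.1 v, v :: p.2)) (seen, stack)).1
      = PySem.Set.update seen nbrs
    ∧ (∀ x, x ∈ (nbrs.foldl (fun (p : PySem.Set Int × List Int) v =>
        if PySem.Set.contains p.1 v then p else (PySem.Set.add p.1 v, v :: p.2)) (seen, stack)).2
        ↔ x ∈ stack ∨ (x ∈ nbrs ∧ x ∉ seen))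
    ∧ (nbrs.foldl (fun (p : PySem.Set Int × List Int) v =>
        if PySem.Set.contains p.1 v then p else (PySem.Set.add p.1 v, v :: p.2)) (seen, stack)).2.length
        + seen.length
      = stack.length + (nbrs.foldl (fun (p : PySem.Set Int × List Int) v =>
        if PySem.Set.contains p.1 v then p else (PySem.Set.add p.1 v, v :: p.2)) (seen, stack)).1.length := by
  induction nbrs generalizing seen stack with
  | nil => exact ⟨rfl, fun x => by simp, by simp⟩
  | cons v rest ih =>
    simp only [List.foldl_cons]
    by_cases hv : PySem.Set.contains seen v = true
    · rw [if_pos hv]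
      obtain ⟨h1, h2, h3⟩ := ih seen stack
      have hvs : v ∈ seen := (PySem.Set.contains_iff seen v).mp hv
      have hadd : PySem.Set.add seen v = seen := by simp [PySem.Set.add, hvs]
      have hupd : PySem.Set.update seen (v :: rest) = PySem.Set.update seen rest := by
        simp [PySem.Set.update, hadd]
      refine ⟨by rw [h1, hupd], fun x => ?_, h3⟩
      rw [h2 x]
      constructor
      · rintro (h | ⟨h, h'⟩)
        · exact Or.inl h
        · exact Or.inr ⟨List.mem_cons_of_mem _ h, h'⟩
      · rintro (h | ⟨h, h'⟩)
        · exact Or.inl h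
        · rcases List.mem_cons.mp h with rfl | h
          · exact absurd hvs h'
          · exact Or.inr ⟨h, h'⟩
    · rw [if_neg hv]
      have hv' : v ∉ seen := fun h => hv ((PySem.Set.contains_iff seen v).mpr h)
      obtain ⟨h1, h2, h3⟩ := ih (PySem.Set.add seen v) (v :: stack)
      have hupd : PySem.Set.update seen (v :: rest) = PySem.Set.update (PySem.Set.add seen v) rest := by
        simp [PySem.Set.update]
      have hlen : (PySem.Set.add seen v).length = seen.length + 1 := by
        simp [PySem.Set.add, hv']
      refine ⟨by rw [h1, hupd], fun x => ?_, by rw [hlen] at h3; simp only [List.length_cons] at h3; omega⟩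
      rw [h2 x]
      constructor
      · rintro (h | ⟨h, h'⟩)
        · rcases List.mem_cons.mp h with rfl | h
          · exact Or.inr ⟨List.mem_cons_self, hv'⟩
          · exact Or.inl h
        · refine Or.inr ⟨List.mem_cons_of_mem _ h, fun hx => h' ?_⟩
          exact (PySem.Set.mem_add seen v x).mpr (Or.inl hx)
      · rintro (h | ⟨h, h'⟩)
        · exact Or.inl (List.mem_cons_of_mem _ h)
        · rcases List.mem_cons.mp h with rfl | h
          · exact Or.inl List.mem_cons_self
          · by_cases hxv : x = v
            · subst hxv; exact Or.inl List.mem_cons_self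
            · refine Or.inr ⟨h, fun hx => ?_⟩
              rcases (PySem.Set.mem_add seen v x).mp hx with hx | hx
              · exact h' hx
              · exact hxv hx


theorem bLoop_spec (outs : List (Int × List Int)) (nodes : List Int)
    (WF : ∀ k ∈ nodes, (pyLookup outs k).isSome ∧ ∀ v ∈ (pyLookup outs k).getD [], v ∈ nodes) :
    ∀ fuel (seen : PySem.Set Int) (stack : List Int), seen.Nodup → (∀ x ∈ seen, x ∈ nodes) →
      (∀ x ∈ stack, x ∈ seen) →
      (∀ u ∈ seen, u ∈ stack ∨ ∀ v ∈ (pyLookup outs u).getD [], v ∈ seen) →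
      stack.length + ((PySem.Set.ofList nodes).length - seen.length) < fuel →
      ∃ seen', bLoop outs fuel seen stack = some seen'
        ∧ (∀ x ∈ seen, x ∈ seen') ∧ (∀ x ∈ seen', x ∈ nodes)
        ∧ (∀ u ∈ seen', ∀ v ∈ (pyLookup outs u).getD [], v ∈ seen')
        ∧ (∀ P : Int → Prop, (∀ a b, P a → b ∈ (pyLookup outs a).getD [] → P b) →
            (∀ x ∈ seen, P x) → ∀ x ∈ seen', P x) := by
  intro fuel
  induction fuel with
  | zero => intro seen stack _ _ _ _ h; exact absurd h (Nat.not_lt_zero _)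
  | succ f ih =>
    intro seen stack hnd hsub hstk hinv hΨ
    cases stack with
    | nil =>
      refine ⟨seen, rfl, fun x h => h, hsub, ?_, fun P _ hb => hb⟩
      intro u hu v hv
      rcases hinv u hu with h | h
      · cases h
      · exact h v hv
    | cons u stack =>
      have huseen : u ∈ seen := hstk u List.mem_cons_self
      have huN : u ∈ nodes := hsub u huseen
      obtain ⟨nbrs, hnbrs⟩ : ∃ nbrs, pyLookup outs u = some nbrs := by
        rcases h : pyLookup outs u with _ | nbrs
        · exfalso; have h2 := (WF u huN).1; rw [h] at h2; simp at h2
        · exact ⟨nbrs, rfl⟩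
      have hnbrsN : ∀ v ∈ nbrs, v ∈ nodes := by
        have := (WF u huN).2; rw [hnbrs] at this; exact this
      obtain ⟨h1, h2, h3⟩ := bFold_spec nbrs seen stack
      set p := nbrs.foldl (fun (p : PySem.Set Int × List Int) v =>
        if PySem.Set.contains p.1 v then p else (PySem.Set.add p.1 v, v :: p.2)) (seen, stack) with hp
      have hrun : bLoop outs (f + 1) seen (u :: stack) = bLoop outs f p.1 p.2 := by
        rw [bLoop, hnbrs]
      have hmemp : ∀ x, x ∈ p.1 ↔ x ∈ seen ∨ x ∈ nbrs := by
        intro x; rw [h1]; exact PySem.Set.mem_update seen nbrs x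
      have hnd' : p.1.Nodup := by rw [h1]; exact PySem.Set.nodup_update seen nbrs hnd
      have hsub' : ∀ x ∈ p.1, x ∈ nodes := by
        intro x hx
        rcases (hmemp x).mp hx with h | h
        · exact hsub x h
        · exact hnbrsN x h
      have hstk' : ∀ x ∈ p.2, x ∈ p.1 := by
        intro x hx
        rcases (h2 x).mp hx with h | ⟨h, _⟩
        · exact (hmemp x).mpr (Or.inl (hstk x (List.mem_cons_of_mem _ h)))
        · exact (hmemp x).mpr (Or.inr h)
      have hinv' : ∀ w ∈ p.1, w ∈ p.2 ∨ ∀ v ∈ (pyLookup outs w).getD [], v ∈ p.1 := by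
        intro w hw
        by_cases hws : w ∈ seen
        · rcases hinv w hws with h | h
          · rcases List.mem_cons.mp h with rfl | h
            · refine Or.inr ?_
              rw [hnbrs]
              exact fun v hv => (hmemp v).mpr (Or.inr hv)
            · exact Or.inl ((h2 w).mpr (Or.inl h))
          · exact Or.inr fun v hv => (hmemp v).mpr (Or.inl (h v hv))
        · rcases (hmemp w).mp hw with h | h
          · exact absurd h hws
          · exact Or.inl ((h2 w).mpr (Or.inr ⟨h, hws⟩))
      have hseensub : seen.length ≤ p.1.length :=
        List.Subperm.length_le (List.subperm_of_subset hnd (fun x hx => (hmemp x).mpr (Or.inl hx)))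
      have hcap : p.1.length ≤ (PySem.Set.ofList nodes).length :=
        List.Subperm.length_le (List.subperm_of_subset hnd'
          (fun x hx => (PySem.Set.mem_ofList nodes x).mpr (hsub' x hx)))
      have hcapseen : seen.length ≤ (PySem.Set.ofList nodes).length :=
        le_trans hseensub hcap
      have hΨ' : p.2.length + ((PySem.Set.ofList nodes).length - p.1.length) < f := by
        simp only [List.length_cons] at hΨ
        omega
      obtain ⟨seen', hrun', hmono, hsubN, hclosed, hmin⟩ := ih p.1 p.2 hnd' hsub' hstk' hinv' hΨ'
      refine ⟨seen', by rw [hrun, hrun'], ?_, hsubN, hclosed, ?_⟩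
      · exact fun x hx => hmono x ((hmemp x).mpr (Or.inl hx))
      · intro P hcl hbase
        refine hmin P hcl ?_
        intro x hx
        rcases (hmemp x).mp hx with h | h
        · exact hbase x h
        · have hPu : P u := hbase u huseen
          refine hcl u x hPu ?_
          rw [hnbrs]
          exact h

theorem check_main (nodes : List Int) (ins : List (Int × List Int)) (outs : List (Int × List Int))
    (hpre : Pre_check nodes ins outs) : check nodes ins outs = check_alt nodes ins outs := by
  by_cases hnil : nodes = []
  · subst hnil; rfl
  · have hlen0 : ¬ nodes.length = 0 := fun h => hnil (List.length_eq_zero_iff.mp h)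
    have hempty : nodes.isEmpty = false := by
      cases nodes with | nil => exact absurd rfl hnil | cons a t => rfl
    cases hok : nodes.all (fun i => !pyHasKey ins i || ((pyLookup ins i).getD []).length == 1) with
    | false =>
      have hany : nodes.any (fun i => pyHasKey ins i && (((pyLookup ins i).getD []).length != 1)) = true := by
        rw [List.any_eq_not_all_not]
        have he : (fun i => !(pyHasKey ins i && (((pyLookup ins i).getD []).length != 1)))
            = (fun i => !pyHasKey ins i || ((pyLookup ins i).getD []).length == 1) := by
          funext i; cases pyHasKey ins i <;> simp [bne]
        rw [he, hok]; rfl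
      rw [check, if_neg hlen0, aLoop_eq]
      rw [check_alt]
      simp [hok, hany, hempty]
    | true =>
      have hany : nodes.any (fun i => pyHasKey ins i && (((pyLookup ins i).getD []).length != 1)) = false := by
        rw [List.any_eq_not_all_not]
        have he : (fun i => !(pyHasKey ins i && (((pyLookup ins i).getD []).length != 1)))
            = (fun i => !pyHasKey ins i || ((pyLookup ins i).getD []).length == 1) := by
          funext i; cases pyHasKey ins i <;> simp [bne]
        rw [he, hok]; rfl
      rw [check, if_neg hlen0, aLoop_eq]
      rw [check_alt]
      simp only [hok, if_true, hany, hempty, Bool.false_eq_true, if_false]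
      by_cases hcp : nodes.countP (fun i => !pyHasKey ins i) = 1
      · -- exactly one root
        obtain ⟨r, hfil⟩ : ∃ r, nodes.filter (fun i => !pyHasKey ins i) = [r] := by
          rw [← List.length_eq_one_iff, ← List.countP_eq_length_filter]; exact hcp
        have hrN : r ∈ nodes := (List.mem_filter.mp (hfil ▸ List.mem_cons_self)).1
        have hcount : (0 : Int) + (nodes.countP (fun i => !pyHasKey ins i) : Int) = 1 := by
          rw [hcp]; norm_num
        rw [hfil]
        simp only [List.getLast?_singleton, Option.getD_some, hcount]
        rw [if_neg (by norm_num)]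
        -- Pre gives the well-formedness of outs on nodes
        have hWF : ∀ i ∈ nodes, (pyLookup outs i).isSome ∧ ∀ v ∈ (pyLookup outs i).getD [], v ∈ nodes := by
          rcases hpre with h | h | h | h
          · exact absurd h hnil
          · obtain ⟨i, hi, hk, hl⟩ := h
            have := List.all_eq_true.mp hok i hi
            simp [hk] at this
            exact absurd this hl
          · exact absurd hcp h
          · exact h
        -- A's traversal
        set vis0 := nodes.foldl (fun d i => d.insert i false) PySem.Dict.empty with hvis0
        set KS := PySem.Set.ofList nodes with hKS
        have hKlen : KS.length ≤ nodes.length := by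
          rw [hKS]; exact PySem.Set.length_ofList_le nodes
        have hkeys0 : vis0.keys = KS := by
          rw [hvis0, PySem.Dict.keys_foldl_insert nodes (fun _ _ => false) PySem.Dict.empty]
          rw [PySem.Dict.keys_empty, hKS, PySem.Set.ofList_eq_foldl]
          rfl
        have hnodK : KS.Nodup := PySem.Set.nodup_ofList nodes
        have hmemK : ∀ x : Int, x ∈ KS ↔ x ∈ nodes := fun x => PySem.Set.mem_ofList nodes x
        have hget0 : ∀ k, vis0.get? k = if k ∈ nodes then some false else none := by
          intro k
          rw [hvis0, get?_foldl_insert_false, PySem.Dict.get?_empty]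
        have hWFK : ∀ k ∈ KS, (pyLookup outs k).isSome ∧ ∀ v ∈ (pyLookup outs k).getD [], v ∈ KS := by
          intro k hk
          obtain ⟨h1, h2⟩ := hWF k ((hmemK k).mp hk)
          exact ⟨h1, fun v hv => (hmemK v).mpr (h2 v hv)⟩
        have hfc0 : falseCount vis0 = KS.length := by
          rw [falseCount_eq_keys vis0 (by rw [hkeys0]; exact hnodK), hkeys0]
          apply List.countP_eq_length.mpr
          intro k hk
          have : vis0.get? k = some false := by rw [hget0 k, if_pos ((hmemK k).mp hk)]
          simp [PySem.Dict.getD_of_get?_eq_some vis0 false this]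
        obtain ⟨visF, hrunF, postF, hrtrue, _⟩ :=
          pf_all outs KS hnodK hWFK (nodes.length + 1) r vis0 hkeys0 ((hmemK r).mpr hrN)
            (by rw [hfc0]; omega)
        have hno0 : ∀ k, ¬ vis0.get? k = some true := by
          intro k h
          rw [hget0 k] at h
          by_cases hm : k ∈ nodes <;> simp [hm] at h
        -- B's traversal
        have hcap1 : 0 < KS.length := List.length_pos_of_mem ((hmemK r).mpr hrN)
        obtain ⟨seenF, hrunB, hmonoB, hsubB, hclosedB, hminB⟩ :=
          bLoop_spec outs nodes hWF (nodes.length + 1) (PySem.Set.ofList [r]) [r]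
            (PySem.Set.nodup_ofList [r])
            (fun x hx => by
              rcases (PySem.Set.mem_ofList [r] x).mp hx with h
              simp at h; exact h ▸ hrN)
            (fun x hx => (PySem.Set.mem_ofList [r] x).mpr hx)
            (fun u hu => Or.inl ((PySem.Set.mem_ofList [r] u).mp hu))
            (by
              have h1 : (PySem.Set.ofList [r]).length = 1 := rfl
              have h2 : (PySem.Set.ofList nodes).length = KS.length := by rw [hKS]
              rw [h1, h2]
              simp only [List.length_cons, List.length_nil]
              omega)
        rw [hrunF, hrunB]
        -- the two visited sets agree
        have hrseen : r ∈ seenF := hmonoB r ((PySem.Set.mem_ofList [r] r).mpr (by simp))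
        have hiff : ∀ k, visF.get? k = some true ↔ k ∈ seenF := by
          intro k
          constructor
          · intro hk
            rcases postF.2.2.2 (· ∈ seenF)
                (fun a b ha hb => hclosedB a ha b hb)
                (fun x hx => hx ▸ hrseen) k hk with h | h
            · exact absurd h (hno0 k)
            · exact h
          · intro hk
            refine hminB (fun x => visF.get? x = some true) ?_ ?_ k hk
            · intro a b ha hb
              rcases postF.2.2.1 a ha with h | h
              · exact absurd h (hno0 a)
              · exact h b hb
            · intro x hx
              rcases (PySem.Set.mem_ofList [r] x).mp hx with h
              simp at h
              exact h ▸ hrtrue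
        -- final membership checks agree
        have hvals : visF.values = KS.map (fun k => visF.getD k false) := by
          rw [PySem.Dict.values_eq_map_keys visF (by rw [postF.1]; exact hnodK) false, postF.1]
        rw [Bool.eq_iff_iff]
        constructor
        · intro h
          simp only [Bool.not_eq_true', List.contains_eq_mem, decide_eq_false_iff_not] at h
          apply List.all_eq_true.mpr
          intro i hi
          refine (PySem.Set.contains_iff seenF i).mpr ?_
          refine (hiff i).mp ?_
          have hikeys : i ∈ visF.keys := by rw [postF.1]; exact (hmemK i).mpr hi
          obtain ⟨b, hb⟩ := get?_isSome_of_mem_keys visF i hikeys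
          cases b with
          | true => exact hb
          | false =>
            exfalso
            apply h
            rw [hvals]
            refine List.mem_map.mpr ⟨i, (hmemK i).mpr hi, ?_⟩
            exact PySem.Dict.getD_of_get?_eq_some visF false hb
        · intro h
          simp only [Bool.not_eq_true', List.contains_eq_mem, decide_eq_false_iff_not]
          intro hmem
          rw [hvals] at hmem
          obtain ⟨k, hkK, hkval⟩ := List.mem_map.mp hmem
          have hkseen : k ∈ seenF :=
            (PySem.Set.contains_iff seenF k).mp (List.all_eq_true.mp h k ((hmemK k).mp hkK))
          have := (hiff k).mpr hkseen
          rw [PySem.Dict.getD_of_get?_eq_some visF false this] at hkval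
          simp at hkval
      · -- root count different from 1
        have hcount : ((0 : Int) + (nodes.countP (fun i => !pyHasKey ins i) : Int)) ≠ 1 := by
          intro h
          apply hcp
          omega
        rw [if_pos hcount]
        rcases hf : nodes.filter (fun i => !pyHasKey ins i) with _ | ⟨a, _ | ⟨b, t⟩⟩
        · rfl
        · exfalso
          apply hcp
          rw [List.countP_eq_length_filter, hf]
          rfl
        · rfl

-- ===== VERDICT (by name: the statement is the Claim_ definition above) =====
theorem check_spec : Claim_equal_check := by
  unfold Claim_equal_check
  intro nodes ins outs _ hpre
  unfold Spec_check
  exact check_main nodes ins outs hpre
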